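-- pv_equiv track=rewrite | github.com/cNille/AdventOfCode | 2021/19.py | get_orientations
-- ===== SOURCE A (Python) =====
-- def get_orientations(beacons):
--     orientations = []
--     orientations.append([( x,  y,  z) for (x,y,z) in beacons])
--     orientations.append([( x,  y, -z) for (x,y,z) in beacons])
--     orientations.append([( x, -y,  z) for (x,y,z) in beacons])
--     orientations.append([( x, -y, -z) for (x,y,z) in beacons])
--     orientations.append([(-x,  y,  z) for (x,y,z) in beacons])
--     orientations.append([(-x,  y, -z) for (x,y,z) in beacons])
--     orientations.append([(-x, -y,  z) for (x,y,z) in beacons])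
--     orientations.append([(-x, -y, -z) for (x,y,z) in beacons])
--     orientations.append([( y,  z,  x) for (x,y,z) in beacons])
--     orientations.append([( y,  z, -x) for (x,y,z) in beacons])
--     orientations.append([( y, -z,  x) for (x,y,z) in beacons])
--     orientations.append([( y, -z, -x) for (x,y,z) in beacons])
--     orientations.append([(-y,  z,  x) for (x,y,z) in beacons])
--     orientations.append([(-y,  z, -x) for (x,y,z) in beacons])
--     orientations.append([(-y, -z,  x) for (x,y,z) in beacons])
--     orientations.append([(-y, -z, -x) for (x,y,z) in beacons])
--     orientations.append([( z,  x,  y) for (x,y,z) in beacons])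
--     orientations.append([( z,  x, -y) for (x,y,z) in beacons])
--     orientations.append([( z, -x,  y) for (x,y,z) in beacons])
--     orientations.append([( z, -x, -y) for (x,y,z) in beacons])
--     orientations.append([(-z,  x,  y) for (x,y,z) in beacons])
--     orientations.append([(-z,  x, -y) for (x,y,z) in beacons])
--     orientations.append([(-z, -x,  y) for (x,y,z) in beacons])
--     orientations.append([(-z, -x, -y) for (x,y,z) in beacons])
--     orientations.append([( x,  z,  y) for (x,y,z) in beacons])
--     orientations.append([( x,  z, -y) for (x,y,z) in beacons])
--     orientations.append([( x, -z,  y) for (x,y,z) in beacons])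
--     orientations.append([( x, -z, -y) for (x,y,z) in beacons])
--     orientations.append([(-x,  z,  y) for (x,y,z) in beacons])
--     orientations.append([(-x,  z, -y) for (x,y,z) in beacons])
--     orientations.append([(-x, -z,  y) for (x,y,z) in beacons])
--     orientations.append([(-x, -z, -y) for (x,y,z) in beacons])
--     orientations.append([( z,  y,  x) for (x,y,z) in beacons])
--     orientations.append([( z,  y, -x) for (x,y,z) in beacons])
--     orientations.append([( z, -y,  x) for (x,y,z) in beacons])
--     orientations.append([( z, -y, -x) for (x,y,z) in beacons])
--     orientations.append([(-z,  y,  x) for (x,y,z) in beacons])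
--     orientations.append([(-z,  y, -x) for (x,y,z) in beacons])
--     orientations.append([(-z, -y,  x) for (x,y,z) in beacons])
--     orientations.append([(-z, -y, -x) for (x,y,z) in beacons])
--     orientations.append([( y,  x,  z) for (x,y,z) in beacons])
--     orientations.append([( y,  x, -z) for (x,y,z) in beacons])
--     orientations.append([( y, -x,  z) for (x,y,z) in beacons])
--     orientations.append([( y, -x, -z) for (x,y,z) in beacons])
--     orientations.append([(-y,  x,  z) for (x,y,z) in beacons])
--     orientations.append([(-y,  x, -z) for (x,y,z) in beacons])
--     orientations.append([(-y, -x,  z) for (x,y,z) in beacons])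
--     orientations.append([(-y, -x, -z) for (x,y,z) in beacons])
--     return orientations
-- ===== SOURCE B (Python) =====
-- def get_orientations(beacons):
--     # Beacon-major single pass: each orientation index k in range(48) is decoded
--     # arithmetically into an axis permutation (k//8) and three sign bits; rows are
--     # built up in 48 accumulators, transposed relative to A's orientation-major scan.
--     PERMS = ((0, 1, 2), (1, 2, 0), (2, 0, 1), (0, 2, 1), (2, 1, 0), (1, 0, 2))
--
--     def orient(pt, k):
--         i, j, l = PERMS[k // 8]
--         a = -pt[i] if (k // 4) % 2 else pt[i]
--         b = -pt[j] if (k // 2) % 2 else pt[j]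
--         c = -pt[l] if k % 2 else pt[l]
--         return (a, b, c)
--
--     out = [[] for _ in range(48)]
--     for pt in beacons:
--         out = [row + [orient(pt, k)] for k, row in enumerate(out)]
--     return out
-- ===== Notes on version B (the rewrite author's own statement) =====
-- stated objective: alternative
-- what changed: Replaces A's 48 unrolled orientation-major comprehensions (48 passes over beacons) with a single beacon-major pass that decodes each orientation index k in range(48) arithmetically into an axis permutation and sign bits and appends into 48 accumulator rows (a transposed construction).
import Mathlib
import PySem

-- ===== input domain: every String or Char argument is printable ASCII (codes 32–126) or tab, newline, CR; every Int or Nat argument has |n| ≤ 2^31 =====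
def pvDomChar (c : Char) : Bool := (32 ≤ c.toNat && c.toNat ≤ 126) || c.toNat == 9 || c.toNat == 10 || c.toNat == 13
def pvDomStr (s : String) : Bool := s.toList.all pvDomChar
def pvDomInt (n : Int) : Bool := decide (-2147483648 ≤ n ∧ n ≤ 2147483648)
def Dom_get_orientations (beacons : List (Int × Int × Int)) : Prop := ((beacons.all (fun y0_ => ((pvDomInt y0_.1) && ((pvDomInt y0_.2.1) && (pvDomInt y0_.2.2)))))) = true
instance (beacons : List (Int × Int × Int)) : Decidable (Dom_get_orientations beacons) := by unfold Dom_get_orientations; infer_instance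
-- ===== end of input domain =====

-- B replaces A's 48 unrolled orientation-major comprehensions with a single beacon-major pass
-- decoding each orientation index 0..47 into permutation+signs (objective: alternative).
-- ===== PORT A =====
def get_orientations (beacons : List (Int × Int × Int)) : List (List (Int × Int × Int)) :=
  [ beacons.map (fun p => ( p.1,  p.2.1,  p.2.2)),
    beacons.map (fun p => ( p.1,  p.2.1, -p.2.2)),
    beacons.map (fun p => ( p.1, -p.2.1,  p.2.2)),
    beacons.map (fun p => ( p.1, -p.2.1, -p.2.2)),
    beacons.map (fun p => (-p.1,  p.2.1,  p.2.2)),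
    beacons.map (fun p => (-p.1,  p.2.1, -p.2.2)),
    beacons.map (fun p => (-p.1, -p.2.1,  p.2.2)),
    beacons.map (fun p => (-p.1, -p.2.1, -p.2.2)),
    beacons.map (fun p => ( p.2.1,  p.2.2,  p.1)),
    beacons.map (fun p => ( p.2.1,  p.2.2, -p.1)),
    beacons.map (fun p => ( p.2.1, -p.2.2,  p.1)),
    beacons.map (fun p => ( p.2.1, -p.2.2, -p.1)),
    beacons.map (fun p => (-p.2.1,  p.2.2,  p.1)),
    beacons.map (fun p => (-p.2.1,  p.2.2, -p.1)),
    beacons.map (fun p => (-p.2.1, -p.2.2,  p.1)),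
    beacons.map (fun p => (-p.2.1, -p.2.2, -p.1)),
    beacons.map (fun p => ( p.2.2,  p.1,  p.2.1)),
    beacons.map (fun p => ( p.2.2,  p.1, -p.2.1)),
    beacons.map (fun p => ( p.2.2, -p.1,  p.2.1)),
    beacons.map (fun p => ( p.2.2, -p.1, -p.2.1)),
    beacons.map (fun p => (-p.2.2,  p.1,  p.2.1)),
    beacons.map (fun p => (-p.2.2,  p.1, -p.2.1)),
    beacons.map (fun p => (-p.2.2, -p.1,  p.2.1)),
    beacons.map (fun p => (-p.2.2, -p.1, -p.2.1)),
    beacons.map (fun p => ( p.1,  p.2.2,  p.2.1)),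
    beacons.map (fun p => ( p.1,  p.2.2, -p.2.1)),
    beacons.map (fun p => ( p.1, -p.2.2,  p.2.1)),
    beacons.map (fun p => ( p.1, -p.2.2, -p.2.1)),
    beacons.map (fun p => (-p.1,  p.2.2,  p.2.1)),
    beacons.map (fun p => (-p.1,  p.2.2, -p.2.1)),
    beacons.map (fun p => (-p.1, -p.2.2,  p.2.1)),
    beacons.map (fun p => (-p.1, -p.2.2, -p.2.1)),
    beacons.map (fun p => ( p.2.2,  p.2.1,  p.1)),
    beacons.map (fun p => ( p.2.2,  p.2.1, -p.1)),
    beacons.map (fun p => ( p.2.2, -p.2.1,  p.1)),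
    beacons.map (fun p => ( p.2.2, -p.2.1, -p.1)),
    beacons.map (fun p => (-p.2.2,  p.2.1,  p.1)),
    beacons.map (fun p => (-p.2.2,  p.2.1, -p.1)),
    beacons.map (fun p => (-p.2.2, -p.2.1,  p.1)),
    beacons.map (fun p => (-p.2.2, -p.2.1, -p.1)),
    beacons.map (fun p => ( p.2.1,  p.1,  p.2.2)),
    beacons.map (fun p => ( p.2.1,  p.1, -p.2.2)),
    beacons.map (fun p => ( p.2.1, -p.1,  p.2.2)),
    beacons.map (fun p => ( p.2.1, -p.1, -p.2.2)),
    beacons.map (fun p => (-p.2.1,  p.1,  p.2.2)),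
    beacons.map (fun p => (-p.2.1,  p.1, -p.2.2)),
    beacons.map (fun p => (-p.2.1, -p.1,  p.2.2)),
    beacons.map (fun p => (-p.2.1, -p.1, -p.2.2)) ]

-- ===== PORT B =====
-- pt[i] on a 3-tuple
def pvCoord (p : Int × Int × Int) (i : Nat) : Int :=
  if i = 0 then p.1 else if i = 1 then p.2.1 else p.2.2

def pvPerms : List (Nat × Nat × Nat) :=
  [(0, 1, 2), (1, 2, 0), (2, 0, 1), (0, 2, 1), (2, 1, 0), (1, 0, 2)]

def pvOrient (pt : Int × Int × Int) (k : Nat) : Int × Int × Int :=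
  let t := pvPerms.getD (k / 8) (0, 0, 0)
  ( if (k / 4) % 2 = 1 then -pvCoord pt t.1 else pvCoord pt t.1,
    if (k / 2) % 2 = 1 then -pvCoord pt t.2.1 else pvCoord pt t.2.1,
    if k % 2 = 1 then -pvCoord pt t.2.2 else pvCoord pt t.2.2 )

-- the enumerate comprehension '[row + [orient(pt,k)] for k, row in enumerate(out)]'
def pvAppendRows (pt : Int × Int × Int) : Nat → List (List (Int × Int × Int)) → List (List (Int × Int × Int))
  | _, [] => []
  | k, row :: rest => (row ++ [pvOrient pt k]) :: pvAppendRows pt (k + 1) rest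

def get_orientations_alt (beacons : List (Int × Int × Int)) : List (List (Int × Int × Int)) :=
  let init : List (List (Int × Int × Int)) := (List.range 48).map (fun _ => [])
  beacons.foldl (fun out pt => pvAppendRows pt 0 out) init

-- ===== PRECONDITION & SPEC =====
def Spec_get_orientations (beacons : List (Int × Int × Int)) (out : List (List (Int × Int × Int))) : Prop := out = get_orientations_alt beacons
instance (beacons : List (Int × Int × Int)) (out : List (List (Int × Int × Int))) : Decidable (Spec_get_orientations beacons out) := by unfold Spec_get_orientations; infer_instance

-- ===== CLAIM =====
def Claim_equal_get_orientations : Prop := ∀ (beacons : List (Int × Int × Int)), Dom_get_orientations beacons → Spec_get_orientations beacons (get_orientations beacons)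

-- ===== LEMMAS AND PROOFS =====
theorem pvAppendRows_map_range' (pt : Int × Int × Int) :
    ∀ (n s : Nat) (g : Nat → List (Int × Int × Int)),
      pvAppendRows pt s ((List.range' s n).map g)
        = (List.range' s n).map (fun k => g k ++ [pvOrient pt k]) := by
  intro n
  induction n with
  | zero => intro s g; simp [pvAppendRows]
  | succ m ih =>
      intro s g
      simp [List.range'_succ, pvAppendRows, ih]

theorem foldl_appendRows (beacons : List (Int × Int × Int)) :
    ∀ (g : Nat → List (Int × Int × Int)),
      beacons.foldl (fun out pt => pvAppendRows pt 0 out) ((List.range' 0 48).map g)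
        = (List.range' 0 48).map (fun k => g k ++ beacons.map (fun pt => pvOrient pt k)) := by
  induction beacons with
  | nil => intro g; simp
  | cons pt rest ih =>
      intro g
      rw [List.foldl_cons, pvAppendRows_map_range', ih]
      simp

-- ===== VERDICT =====
theorem get_orientations_spec : Claim_equal_get_orientations := by
  intro beacons _
  unfold Spec_get_orientations get_orientations_alt get_orientations
  rw [List.range_eq_range', foldl_appendRows]
  have h48 : List.range' 0 48 = [0,1,2,3,4,5,6,7,8,9,10,11,12,13,14,15,16,17,18,19,20,21,22,23,24,25,26,27,28,29,30,31,32,33,34,35,36,37,38,39,40,41,42,43,44,45,46,47] := by decide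
  rw [h48]
  rfl
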